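-- pv_equiv track=rewrite | github.com/PPPPParadise/Danone-international-label-advanced-forecast | src/forecaster/utilitaires.py | get_all_combination_date
-- ===== SOURCE A (Python) =====
-- from typing import List
--
-- def add_period(date: int, add: int, highest_period: int = 12) -> int:
--     """ This function returns a week (or month) equal to date + add
--     Inputs:
--         - date: integer indicating a week number or month number
--         - add: integer indicating the number of weeks to add
--         - is_weekly_mode: boolean that indicates if the date is in week or months
--     Returns:
--         - res: the resulting operation (a new date, integer)
--     """
--
--     i = 0
--     while i < add:
--         if date % 100 != highest_period:
--             date += 1
--         else:
--             date = ((date // 100) + 1) * 100 + 1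
--         i += 1
--     return date
--
-- def get_all_combination_date(dwp: List, horizon: int):
--     """ This function creates dates_when_predicting list and its associated date_to_predict taking into account the given
--     horizon
--
--     :param dwp: list of dates when predicting
--     :param horizon: horizon of prediction
--     :return: lists of dwp and dtp
--     """
--
--     list_dwp = list()
--     list_dtp = list()
--     for w in dwp:
--         for h in range(1, horizon + 1):
--             list_dwp.append(w)
--             list_dtp.append(add_period(w, h))
--     return list_dwp, list_dtp
-- ===== SOURCE B (Python) =====
-- def get_all_combination_date(dwp, horizon):
--     """Same (list_dwp, list_dtp) as A, but steps one period at a time per w: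
--     O(len(dwp)*horizon) instead of A's O(len(dwp)*horizon^2)."""
--     list_dwp = []
--     list_dtp = []
--     for w in dwp:
--         list_dwp.extend([w] * horizon)
--         cur = w
--         for _ in range(horizon):
--             cur = cur + 1 if cur % 100 != 12 else (cur // 100 + 1) * 100 + 1
--             list_dtp.append(cur)
--     return list_dwp, list_dtp
-- ===== Notes on version B (the rewrite author's own statement) =====
-- stated objective: faster
-- what changed: B steps each start date one period at a time (O(1) per step) and collects the running value, instead of A's per-h add_period loop that re-walks h steps from w for every horizon entry.
import Mathlib
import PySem

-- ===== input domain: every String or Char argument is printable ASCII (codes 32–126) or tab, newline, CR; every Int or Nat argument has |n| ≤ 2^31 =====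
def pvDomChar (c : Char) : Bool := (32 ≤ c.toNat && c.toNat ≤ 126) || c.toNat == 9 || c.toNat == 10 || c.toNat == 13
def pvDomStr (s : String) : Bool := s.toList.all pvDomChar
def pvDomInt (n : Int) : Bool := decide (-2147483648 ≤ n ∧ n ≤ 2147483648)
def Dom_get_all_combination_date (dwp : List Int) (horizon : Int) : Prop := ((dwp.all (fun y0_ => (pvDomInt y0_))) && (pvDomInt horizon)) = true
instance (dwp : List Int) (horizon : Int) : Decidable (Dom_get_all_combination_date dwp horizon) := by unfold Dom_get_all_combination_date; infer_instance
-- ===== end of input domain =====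

-- B changes the algorithm: it steps one period at a time per start date instead of
-- recomputing add_period from scratch for every h (O(n·horizon) vs O(n·horizon²)).

-- ===== PORT A =====
-- A's add_period while loop: i counts up to add, stepping the date each time.
def addPeriodLoop (date : Int) (add : Int) (highest_period : Int) (i : Int) : Int :=
  if _h : i < add then
    addPeriodLoop
      (if PySem.Int.mod date 100 ≠ highest_period then date + 1
       else (PySem.Int.floordiv date 100 + 1) * 100 + 1)
      add highest_period (i + 1)
  else date
termination_by (add - i).toNat
decreasing_by omega

def add_period (date : Int) (add : Int) (highest_period : Int) : Int :=
  addPeriodLoop date add highest_period 0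

def get_all_combination_date (dwp : List Int) (horizon : Int) : List Int × List Int :=
  dwp.foldl
    (fun acc w =>
      (PySem.List.pyRange 1 (horizon + 1) 1).foldl
        (fun acc2 h => (acc2.1 ++ [w], acc2.2 ++ [add_period w h 12])) acc)
    ([], [])

-- ===== PORT B =====
-- one O(1) step: cur + 1, or roll over to month 1 of the next year
def stepPeriod (d : Int) : Int :=
  if PySem.Int.mod d 100 ≠ 12 then d + 1 else (PySem.Int.floordiv d 100 + 1) * 100 + 1

-- B's inner loop: repeatedly step cur, collecting each new value
def stepChain (cur : Int) : Nat → List Int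
  | 0 => []
  | n + 1 => stepPeriod cur :: stepChain (stepPeriod cur) n

def get_all_combination_date_alt (dwp : List Int) (horizon : Int) : List Int × List Int :=
  dwp.foldl
    (fun acc w => (acc.1 ++ List.replicate horizon.toNat w, acc.2 ++ stepChain w horizon.toNat))
    ([], [])

-- ===== PRECONDITION & SPEC =====
def Spec_get_all_combination_date (dwp : List Int) (horizon : Int) (out : List Int × List Int) : Prop := out = get_all_combination_date_alt dwp horizon
instance (dwp : List Int) (horizon : Int) (out : List Int × List Int) : Decidable (Spec_get_all_combination_date dwp horizon out) := by unfold Spec_get_all_combination_date; infer_instance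

-- ===== CLAIM (what is proved, stated in full; the proofs are below) =====
def Claim_equal_get_all_combination_date : Prop := ∀ (dwp : List Int) (horizon : Int), Dom_get_all_combination_date dwp horizon → Spec_get_all_combination_date dwp horizon (get_all_combination_date dwp horizon)

-- ===== LEMMAS AND PROOFS =====

-- iterate stepPeriod n times (proof-only helper)
def iterStep : Nat → Int → Int
  | 0, d => d
  | n + 1, d => iterStep n (stepPeriod d)

lemma addPeriodLoop_eq (n : Nat) : ∀ (date add i : Int), (add - i).toNat = n →
    addPeriodLoop date add 12 i = iterStep n date := by
  induction n with
  | zero =>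
    intro date add i h
    rw [addPeriodLoop]
    simp only [dif_neg (by omega : ¬ i < add)]
    rfl
  | succ m ih =>
    intro date add i h
    rw [addPeriodLoop]
    simp only [dif_pos (by omega : i < add)]
    rw [ih _ add (i + 1) (by omega)]
    rfl

lemma add_period_eq (date : Int) (add : Int) :
    add_period date add 12 = iterStep add.toNat date := by
  exact addPeriodLoop_eq add.toNat date add 0 (by omega)

lemma stepChain_succ (cur : Int) (n : Nat) :
    stepChain cur (n + 1) = stepChain cur n ++ [iterStep (n + 1) cur] := by
  induction n generalizing cur with
  | zero => rfl
  | succ m ih =>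
    show stepPeriod cur :: stepChain (stepPeriod cur) (m + 1) = _
    rw [ih (stepPeriod cur)]
    rfl

lemma inner_foldl_eq (w : Int) (n : Nat) (acc : List Int × List Int) :
    (PySem.List.pyRange 1 ((n : Int) + 1) 1).foldl
      (fun acc2 h => (acc2.1 ++ [w], acc2.2 ++ [add_period w h 12])) acc
    = (acc.1 ++ List.replicate n w, acc.2 ++ stepChain w n) := by
  induction n generalizing acc with
  | zero =>
    rw [PySem.List.pyRange_one_eq_nil (by omega)]
    simp [stepChain]
  | succ m ih =>
    rw [show ((m + 1 : Nat) : Int) + 1 = ((m : Int) + 1) + 1 by push_cast; ring,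
        PySem.List.pyRange_one_succ_right (by omega), List.foldl_append, ih]
    simp only [List.foldl_cons, List.foldl_nil]
    rw [add_period_eq w ((m : Int) + 1), show ((m : Int) + 1).toNat = m + 1 by omega,
        stepChain_succ, List.replicate_succ']
    simp

lemma inner_foldl_eq_int (w : Int) (horizon : Int) (acc : List Int × List Int) :
    (PySem.List.pyRange 1 (horizon + 1) 1).foldl
      (fun acc2 h => (acc2.1 ++ [w], acc2.2 ++ [add_period w h 12])) acc
    = (acc.1 ++ List.replicate horizon.toNat w, acc.2 ++ stepChain w horizon.toNat) := by
  by_cases hpos : 0 ≤ horizon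
  · have : horizon = (horizon.toNat : Int) := by omega
    rw [this]
    exact inner_foldl_eq w horizon.toNat acc
  · rw [PySem.List.pyRange_one_eq_nil (by omega),
        show horizon.toNat = 0 by omega]
    simp [stepChain]

-- ===== VERDICT (by name: the statement is the Claim_ definition above) =====
theorem get_all_combination_date_spec : Claim_equal_get_all_combination_date := by
  intro dwp horizon _
  show get_all_combination_date dwp horizon = get_all_combination_date_alt dwp horizon
  unfold get_all_combination_date get_all_combination_date_alt
  congr 1
  funext acc w
  exact inner_foldl_eq_int w horizon acc
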